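-- pv_equiv track=rewrite | github.com/MaGCats/getting-os-items | Utilities/urlUtil.py | getUnSmallThumbnailUrl
-- ===== SOURCE A (Python) =====
-- def getUnSmallThumbnailUrl(url):
--     if not '=' in url:
--         return url
--
--     # 最後に出現するイコールから後を追加しない形で除去
--     result_url = ''
--     url_arr = url.split('=')
--     for i in range(len(url_arr)):
--         if i == len(url_arr) - 1:
--             break
--         if i != 0:
--             result_url += '='
--         result_url += url_arr[i]
--
--     return result_url
-- ===== SOURCE B (Python) =====
-- def getUnSmallThumbnailUrl(url):
--     if '=' not in url:
--         return url
--     return url[:url.rfind('=')]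
-- ===== Notes on version B (the rewrite author's own statement) =====
-- stated objective: simpler
-- what changed: B drops the split-into-tokens list and the rebuild-all-but-last loop; it keeps only the index of the last '=' (rfind) and returns one slice.
import Mathlib
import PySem

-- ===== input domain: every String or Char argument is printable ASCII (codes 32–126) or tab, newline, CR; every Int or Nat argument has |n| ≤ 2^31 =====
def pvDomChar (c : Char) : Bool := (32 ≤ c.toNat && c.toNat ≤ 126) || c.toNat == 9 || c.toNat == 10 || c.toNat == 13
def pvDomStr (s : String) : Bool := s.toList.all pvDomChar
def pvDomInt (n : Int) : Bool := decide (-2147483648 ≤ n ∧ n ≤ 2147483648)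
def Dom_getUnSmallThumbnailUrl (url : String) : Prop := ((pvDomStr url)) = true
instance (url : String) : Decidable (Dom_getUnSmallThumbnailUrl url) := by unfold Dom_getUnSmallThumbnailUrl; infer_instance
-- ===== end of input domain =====

-- B drops A's split-into-tokens list and rebuild-all-but-last loop, keeping only the index of the
-- last '=' (rfind) and returning one slice (objective: simpler).

-- ===== PORT A =====
-- A's loop `for i in range(n): if i == n - 1: break; if i != 0: res += '='; res += url_arr[i]`
-- as the obvious index recursion over the same state; every executed body step has i < n = arr.length,
-- so `arr.getD i []` is exactly Python's url_arr[i] there.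
def pvALoop (arr : List (List Char)) (n i : Nat) (res : List Char) : List Char :=
  if _h : i < n then
    if i = n - 1 then res
    else pvALoop arr n (i + 1) ((if i ≠ 0 then res ++ ['='] else res) ++ arr.getD i [])
  else res
termination_by n - i
decreasing_by omega

-- port of A at the Chars (code-point) level (exact; Lean's own String ops are kernel-opaque)
def getUnSmallThumbnailUrl (url : String) : String :=
  if ¬ PySem.Chars.isIn ['='] url.toList then url
  else
    let url_arr := PySem.Chars.splitOn url.toList ['=']
    String.ofList (pvALoop url_arr url_arr.length 0 [])

-- ===== PORT B =====
def getUnSmallThumbnailUrl_alt (url : String) : String :=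
  if ¬ PySem.Chars.isIn ['='] url.toList then url
  else
    String.ofList
      (PySem.Chars.slice url.toList none (some (PySem.Chars.rfind url.toList ['='])))

-- ===== PRECONDITION & SPEC =====
def Spec_getUnSmallThumbnailUrl (url : String) (out : String) : Prop := out = getUnSmallThumbnailUrl_alt url
instance (url : String) (out : String) : Decidable (Spec_getUnSmallThumbnailUrl url out) := by unfold Spec_getUnSmallThumbnailUrl; infer_instance

-- ===== CLAIM (what is proved, stated in full; the proofs are below) =====
def Claim_equal_getUnSmallThumbnailUrl : Prop := ∀ (url : String), Dom_getUnSmallThumbnailUrl url → Spec_getUnSmallThumbnailUrl url (getUnSmallThumbnailUrl url)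

-- ===== LEMMAS AND PROOFS =====

theorem pv_modifyHead_id {α : Type} (l : List α) : List.modifyHead (fun x => x) l = l := by
  cases l <;> rfl

theorem pv_splitOn_go (c : Char) :
    ∀ (fuel : Nat) (l cur : List Char) (acc : List (List Char)), l.length ≤ fuel →
      PySem.Chars.splitOn.go [c] fuel l cur acc
        = acc.reverse ++ (l.splitOn c).modifyHead (cur.reverse ++ ·) := by
  intro fuel
  induction fuel with
  | zero =>
    intro l cur acc hl
    have : l = [] := List.length_eq_zero_iff.mp (Nat.le_zero.mp hl)
    subst this
    rw [PySem.Chars.splitOn.go.eq_def]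
    simp [List.splitOn]
  | succ fuel ih =>
    intro l cur acc hl
    cases l with
    | nil =>
      rw [PySem.Chars.splitOn.go.eq_def]
      simp [List.splitOn]
    | cons x rest =>
      by_cases hx : c = x
      · subst hx
        have hpre : [c].isPrefixOf (c :: rest) = true := by simp [List.isPrefixOf]
        rw [PySem.Chars.splitOn.go.eq_def]
        simp only [hpre, if_true, List.length_singleton, List.drop_succ_cons, List.drop_zero]
        rw [ih rest [] (cur.reverse :: acc) (by simpa using Nat.succ_le_succ_iff.mp hl)]
        simp [List.splitOn, List.splitOnP_cons, pv_modifyHead_id]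
      · have hpre : [c].isPrefixOf (x :: rest) = false := by
          simp [List.isPrefixOf, beq_iff_eq]; exact fun h => absurd h hx
        rw [PySem.Chars.splitOn.go.eq_def]
        simp only [hpre, Bool.false_eq_true, if_false]
        rw [ih rest (x :: cur) acc (by simpa using Nat.succ_le_succ_iff.mp hl)]
        simp only [List.splitOn, List.splitOnP_cons, beq_iff_eq]
        rw [if_neg (fun h => absurd h.symm hx)]
        obtain ⟨p, ps, hps⟩ := List.exists_cons_of_ne_nil (List.splitOnP_ne_nil (· == c) rest)
        simp [hps]

theorem pv_splitOn_eq (c : Char) (s : List Char) :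
    PySem.Chars.splitOn s [c] = s.splitOn c := by
  have := pv_splitOn_go c (s.length + 1) s [] [] (by omega)
  simpa [PySem.Chars.splitOn, pv_modifyHead_id] using this

theorem pv_rfind_go (c : Char) (a b : List Char) (hb : c ∉ b) :
    ∀ k : Nat, a.length ≤ k → k ≤ (a ++ c :: b).length →
      PySem.Chars.rfind.go (a ++ c :: b) [c] k = (a.length : Int) := by
  intro k
  induction k with
  | zero =>
    intro h1 _
    have ha : a = [] := List.length_eq_zero_iff.mp (Nat.le_zero.mp h1)
    subst ha
    rw [PySem.Chars.rfind.go.eq_def]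
    simp [List.isPrefixOf]
  | succ j ih =>
    intro h1 h2
    rw [PySem.Chars.rfind.go.eq_def]
    by_cases heq : j + 1 = a.length
    · have hd : List.drop (j + 1) (a ++ c :: b) = c :: b := by
        rw [heq, List.drop_append_of_le_length le_rfl]
        simp
      simp [List.isPrefixOf, heq]
    · have hgt : a.length ≤ j := by omega
      have hdrop : List.drop (j + 1) (a ++ c :: b) = List.drop (j - a.length) b := by
        rw [List.drop_append]
        rw [List.drop_of_length_le (by omega : a.length ≤ j + 1)]
        have h3 : j + 1 - a.length = (j - a.length) + 1 := by omega
        simp [h3]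
      have hpre : [c].isPrefixOf (List.drop (j + 1) (a ++ c :: b)) = false := by
        rw [hdrop]
        cases hcase : List.drop (j - a.length) b with
        | nil => rfl
        | cons y ys =>
          have hy : y ∈ b := List.mem_of_mem_drop (hcase ▸ List.mem_cons_self)
          simp [List.isPrefixOf]
          exact fun h => absurd (h ▸ hy) hb
      simp only [hpre, Bool.false_eq_true, if_false]
      exact ih hgt (by omega)

theorem pv_rfind_eq (c : Char) (a b : List Char) (hb : c ∉ b) :
    PySem.Chars.rfind (a ++ c :: b) [c] = (a.length : Int) := by
  unfold PySem.Chars.rfind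
  exact pv_rfind_go c a b hb _ (by simp) le_rfl
theorem pv_intercalate_cons (c : Char) (x : List Char) (xs : List (List Char)) :
    [c].intercalate (x :: xs) = x ++ xs.flatMap (fun p => c :: p) := by
  induction xs generalizing x with
  | nil => simp [List.intercalate]
  | cons y ys ih =>
    have h := ih y
    simp only [List.intercalate, List.intersperse_cons₂, List.flatten_cons] at h ⊢
    simp [h]

theorem pv_loop_inv (arr : List (List Char)) (n : Nat) (hn : n = arr.length) :
    ∀ (fuel i : Nat) (res : List Char), n - i ≤ fuel → 1 ≤ i →
      pvALoop arr n i res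
        = res ++ ((arr.take (n - 1)).drop i).flatMap (fun p => '=' :: p) := by
  intro fuel
  induction fuel with
  | zero =>
    intro i res hf hi
    have hni : n ≤ i := by omega
    rw [pvALoop]
    rw [dif_neg (by omega)]
    have : (arr.take (n - 1)).drop i = [] :=
      List.drop_of_length_le (by simp [hn]; omega)
    simp [this]
  | succ fuel ih =>
    intro i res hf hi
    rw [pvALoop]
    by_cases h : i < n
    · rw [dif_pos h]
      by_cases he : i = n - 1
      · rw [if_pos he]
        have : (arr.take (n - 1)).drop i = [] :=
          List.drop_of_length_le (by simp [hn]; omega)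
        simp [this]
      · rw [if_neg he]
        rw [if_pos (by omega : i ≠ 0)]
        rw [ih (i + 1) _ (by omega) (by omega)]
        have hlen : i < (arr.take (n - 1)).length := by simp [hn]; omega
        have hdc : (arr.take (n - 1)).drop i
            = (arr.take (n - 1))[i] :: (arr.take (n - 1)).drop (i + 1) :=
          List.drop_eq_getElem_cons hlen
        have hgd : arr.getD i [] = (arr.take (n - 1))[i] := by
          rw [List.getElem_take, List.getD_eq_getElem arr [] (by omega)]
        rw [hdc, hgd]
        simp
    · rw [dif_neg h]
      have : (arr.take (n - 1)).drop i = [] :=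
        List.drop_of_length_le (by simp [hn]; omega)
      simp [this]

theorem pv_loop_eq (arr : List (List Char)) (hne : arr ≠ []) :
    pvALoop arr arr.length 0 []
      = [('=' : Char)].intercalate (arr.take (arr.length - 1)) := by
  have hpos : 0 < arr.length := List.length_pos_iff.mpr hne
  rw [pvALoop, dif_pos hpos]
  by_cases h1 : arr.length = 1
  · rw [if_pos (by omega)]
    simp [h1, List.intercalate]
  · rw [if_neg (by omega)]
    simp only [ne_eq, not_true_eq_false, if_false, List.nil_append]
    rw [pv_loop_inv arr arr.length rfl (arr.length) 1 _ (by omega) le_rfl]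
    have hlen : 0 < (arr.take (arr.length - 1)).length := by simp; omega
    have hdc : arr.take (arr.length - 1)
        = (arr.take (arr.length - 1))[0] :: (arr.take (arr.length - 1)).drop 1 := by
      have h0 := List.drop_eq_getElem_cons (l := arr.take (arr.length - 1)) (i := 0) hlen
      rwa [List.drop_zero] at h0
    have hgd : arr.getD 0 [] = (arr.take (arr.length - 1))[0] := by
      rw [List.getElem_take, List.getD_eq_getElem arr [] (by omega)]
    rw [hdc, pv_intercalate_cons, hgd]
    simp
theorem pv_exists_last {c : Char} {cs : List Char} (h : c ∈ cs) :
    ∃ a b, cs = a ++ c :: b ∧ c ∉ b := by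
  induction cs with
  | nil => cases h
  | cons x rest ih =>
    by_cases hr : c ∈ rest
    · obtain ⟨a, b, hab, hbb⟩ := ih hr
      exact ⟨x :: a, b, by simp [hab], hbb⟩
    · rcases List.mem_cons.mp h with h | h
      · exact ⟨[], rest, by simp [h], hr⟩
      · exact absurd h hr


-- ===== VERDICT (by name: the statement is the Claim_ definition above) =====
theorem getUnSmallThumbnailUrl_spec : Claim_equal_getUnSmallThumbnailUrl := by
  intro url _
  unfold Spec_getUnSmallThumbnailUrl getUnSmallThumbnailUrl getUnSmallThumbnailUrl_alt
  by_cases hin : PySem.Chars.isIn ['='] url.toList = true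
  · simp only [hin, not_true_eq_false, if_false]
    have hmem : '=' ∈ url.toList :=
      ((PySem.Chars.isIn_iff_infix _ _).mp hin).subset (List.mem_cons_self)
    obtain ⟨a, b, hab, hb⟩ := pv_exists_last hmem
    have hsp : PySem.Chars.splitOn url.toList ['='] = a.splitOn '=' ++ [b] := by
      rw [pv_splitOn_eq, hab]
      unfold List.splitOn
      rw [List.splitOnP_append_cons _ _ _ _ (by simp)]
      rw [List.splitOnP_eq_single (xs := b) _ (fun x hx => by
        simp only [beq_iff_eq]
        exact fun he => absurd (he ▸ hx) hb)]
    rw [hsp]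
    have hne : a.splitOn '=' ++ [b] ≠ [] := by simp
    rw [pv_loop_eq _ hne]
    have hlen : (a.splitOn '=' ++ [b]).length - 1 = (a.splitOn '=').length := by simp
    rw [hlen, List.take_left]
    rw [List.intercalate_splitOn]
    have hrf : PySem.Chars.rfind url.toList ['='] = (a.length : Int) := by
      rw [hab]; exact pv_rfind_eq '=' a b hb
    rw [hrf, PySem.Chars.slice_eq_listSlice, PySem.List.slice_to_natCast, hab,
      List.take_left]
  · simp [hin]
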